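-- pv_equiv track=rewrite | github.com/MichaelDepner/AdventOfCode2020 | day_6/day_6_2.py | remove_partial_answers_from_group
-- ===== SOURCE A (Python) =====
-- def remove_partial_answers_from_group(group_list):
--     updated_group_list = []
--     for group in group_list:
--         character_seen = []
--         updated_group = ""
--         for character in group[1]:
--             if character not in character_seen:
--                 character_seen.append(character)
--                 if str.count(group[1], character) == group[0]:
--                     updated_group += character
--         updated_group_list.append(updated_group)
--     return updated_group_list
-- ===== SOURCE B (Python) =====
-- def _keep_exact(n, remaining):
--     if not remaining:
--         return []
--     c = remaining[0]
--     rest = [x for x in remaining if x != c]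
--     head = [c] if len(remaining) - len(rest) == n else []
--     return head + _keep_exact(n, rest)
--
--
-- def remove_partial_answers_from_group(group_list):
--     return ["".join(_keep_exact(n, list(s))) for n, s in group_list]
-- ===== Notes on version B (the rewrite author's own statement) =====
-- stated objective: alternative
-- what changed: B repeatedly peels the remaining string's first character: it removes all of that character's occurrences in one partition pass, derives the character's count from the length drop, and recurses on the shrunken remainder, so A's seen-list dedup and per-character str.count rescans disappear.
import Mathlib
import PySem

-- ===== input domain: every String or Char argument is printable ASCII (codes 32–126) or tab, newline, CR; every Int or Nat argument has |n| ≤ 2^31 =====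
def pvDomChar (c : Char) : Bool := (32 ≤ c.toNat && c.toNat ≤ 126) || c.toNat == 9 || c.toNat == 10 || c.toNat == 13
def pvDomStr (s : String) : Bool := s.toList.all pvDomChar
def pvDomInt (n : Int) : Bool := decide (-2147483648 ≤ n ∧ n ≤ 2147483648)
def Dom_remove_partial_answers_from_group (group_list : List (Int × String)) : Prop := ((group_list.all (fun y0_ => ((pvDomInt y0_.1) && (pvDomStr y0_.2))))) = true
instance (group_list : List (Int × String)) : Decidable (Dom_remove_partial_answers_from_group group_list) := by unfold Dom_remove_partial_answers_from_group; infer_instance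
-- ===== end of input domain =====

-- B peels off all occurrences of the remaining string's first character per step (count = length
-- drop) and recurses on the remainder — no seen-list and no str.count rescans (alternative algorithm).

-- ===== PORT A =====
-- inner loop state: (character_seen, updated_group as a char list)
def remove_partial_answers_from_group (group_list : List (Int × String)) : List String :=
  group_list.foldl
    (fun updated_group_list group =>
      let st := group.2.toList.foldl
        (fun (st : List Char × List Char) character =>
          if character ∈ st.1 then st
          else (st.1 ++ [character],
                if ((PySem.Str.count group.2 (String.ofList [character]) : Int) == group.1)
                then st.2 ++ [character] else st.2))
        ([], [])
      updated_group_list ++ [String.ofList st.2])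
    []

-- ===== PORT B =====
-- B's helper _keep_exact: peel all copies of the first character, keep it if the length drop equals n
def pvKeepExact (n : Int) : List Char → List Char
  | [] => []
  | c :: t =>
    let rest := (c :: t).filter (fun x => x != c)
    (if (((c :: t).length : Int) - (rest.length : Int)) == n then [c] else []) ++ pvKeepExact n rest
  termination_by l => l.length
  decreasing_by
    simp only [List.filter, bne_self_eq_false]
    exact Nat.lt_succ_of_le (List.length_filter_le _ _)

def remove_partial_answers_from_group_alt (group_list : List (Int × String)) : List String :=
  group_list.map (fun g => String.ofList (pvKeepExact g.1 g.2.toList))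

-- ===== PRECONDITION & SPEC =====
def Spec_remove_partial_answers_from_group (group_list : List (Int × String)) (out : List String) : Prop := out = remove_partial_answers_from_group_alt group_list
instance (group_list : List (Int × String)) (out : List String) : Decidable (Spec_remove_partial_answers_from_group group_list out) := by unfold Spec_remove_partial_answers_from_group; infer_instance

-- ===== CLAIM (what is proved, stated in full; the proofs are below) =====
def Claim_equal_remove_partial_answers_from_group : Prop := ∀ (group_list : List (Int × String)), Dom_remove_partial_answers_from_group group_list → Spec_remove_partial_answers_from_group group_list (remove_partial_answers_from_group group_list)

-- ===== LEMMAS AND PROOFS =====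

-- str.count of a single-character needle counts occurrences of that character
theorem chars_count_go_singleton (c : Char) :
    ∀ (l : List Char) (fuel acc : Nat), l.length ≤ fuel →
      PySem.Chars.count.go [c] fuel l acc = acc + l.count c := by
  intro l
  induction l with
  | nil => intro fuel acc _; cases fuel <;> simp [PySem.Chars.count.go]
  | cons h t ih =>
      intro fuel acc hf
      cases fuel with
      | zero => simp at hf
      | succ n =>
          have hlen : t.length ≤ n := by simpa using hf
          by_cases hc : c = h
          · subst hc
            simp only [PySem.Chars.count.go, List.isPrefixOf]
            simp only [BEq.rfl, Bool.and_self, if_pos, List.count_cons_self]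
            have hdrop : List.drop [c].length (c :: t) = t := rfl
            rw [hdrop, ih n (acc + 1) hlen]
            omega
          · have hb : (c == h) = false := by simp [hc]
            simp only [PySem.Chars.count.go, List.isPrefixOf, hb, Bool.false_and,
              Bool.false_eq_true, if_false]
            rw [ih n acc hlen]
            simp [Ne.symm hc]

theorem str_count_singleton (s : String) (c : Char) :
    PySem.Str.count s (String.ofList [c]) = s.toList.count c := by
  have h : PySem.Str.count s (String.ofList [c])
      = PySem.Chars.count s.toList (String.ofList [c]).toList := rfl
  rw [h]
  have h2 : (String.ofList [c]).toList = [c] := String.toList_ofList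
  rw [h2]
  have h3 : PySem.Chars.count s.toList [c]
      = PySem.Chars.count.go [c] s.toList.length s.toList 0 := by
    simp [PySem.Chars.count]
  rw [h3]
  simpa using chars_count_go_singleton c s.toList s.toList.length 0 le_rfl

-- the elements A's seen-list gains from scanning l, in first-seen order
def pvNewElems : List Char → List Char → List Char
  | [], _ => []
  | c :: t, seen => if c ∈ seen then pvNewElems t seen else c :: pvNewElems t (seen ++ [c])

-- A's inner loop, closed form
theorem loopA (P : Char → Bool) :
    ∀ (l seen out : List Char),
      (l.foldl
        (fun (st : List Char × List Char) c =>
          if c ∈ st.1 then st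
          else (st.1 ++ [c], if P c then st.2 ++ [c] else st.2))
        (seen, out)).2
      = out ++ (pvNewElems l seen).filter P := by
  intro l
  induction l with
  | nil => intro seen out; simp [pvNewElems]
  | cons c t ih =>
      intro seen out
      by_cases hc : c ∈ seen
      · simp [pvNewElems, hc, ih]
      · by_cases hP : P c
        · simp [pvNewElems, hc, hP, ih]
        · simp [pvNewElems, hc, hP, ih]

theorem newElems_mem_congr :
    ∀ (l s1 s2 : List Char), (∀ x, x ∈ s1 ↔ x ∈ s2) →
      pvNewElems l s1 = pvNewElems l s2 := by
  intro l
  induction l with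
  | nil => intro _ _ _; rfl
  | cons c t ih =>
      intro s1 s2 h
      by_cases hc : c ∈ s1
      · simp [pvNewElems, hc, (h c).mp hc, ih _ _ h]
      · have hc2 : c ∉ s2 := fun hm => hc ((h c).mpr hm)
        have h' : ∀ x, x ∈ s1 ++ [c] ↔ x ∈ s2 ++ [c] := by
          intro x; simp [h x]
        simp [pvNewElems, hc, hc2, ih _ _ h']

-- marking c seen = deleting all its occurrences from the rest of the scan
theorem newElems_seen_filter :
    ∀ (l seen : List Char) (c : Char), c ∉ seen →
      pvNewElems l (seen ++ [c]) = pvNewElems (l.filter (fun x => x != c)) seen := by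
  intro l
  induction l with
  | nil => intro _ _ _; rfl
  | cons x t ih =>
      intro seen c hc
      by_cases hxc : x = c
      · subst hxc
        simp [pvNewElems, List.filter, ih _ _ hc]
      · have hb : (x != c) = true := by simp [hxc]
        by_cases hxs : x ∈ seen
        · have hxin : x ∈ seen ++ [c] := by simp [hxs]
          rw [List.filter_cons]
          simp only [hb, if_true]
          simp [pvNewElems, hxin, hxs, ih _ _ hc]
        · have hxsc : x ∉ seen ++ [c] := by simp [hxs, hxc]
          have hcsx : c ∉ seen ++ [x] := by simp [hc, Ne.symm hxc]
          have hperm : ∀ y, y ∈ seen ++ [c] ++ [x] ↔ y ∈ seen ++ [x] ++ [c] := by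
            intro y; simp; tauto
          rw [List.filter_cons]
          simp only [hb, if_true, pvNewElems, if_neg hxsc, if_neg hxs]
          rw [newElems_mem_congr _ _ _ hperm, ih _ _ hcsx]

theorem newElems_mem :
    ∀ (l seen : List Char) (x : Char), x ∈ pvNewElems l seen → x ∈ l := by
  intro l
  induction l with
  | nil => intro _ _ h; simp [pvNewElems] at h
  | cons c t ih =>
      intro seen x h
      by_cases hc : c ∈ seen
      · simp only [pvNewElems, if_pos hc] at h
        exact List.mem_cons_of_mem _ (ih _ _ h)
      · simp only [pvNewElems, if_neg hc, List.mem_cons] at h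
        rcases h with h | h
        · simp [h]
        · exact List.mem_cons_of_mem _ (ih _ _ h)

-- the length drop of the peel is the peeled character's count
theorem count_add_length_filter :
    ∀ (t : List Char) (c : Char),
      t.count c + (t.filter (fun x => x != c)).length = t.length := by
  intro t c
  induction t with
  | nil => rfl
  | cons x t ih =>
      by_cases hx : x = c
      · subst hx
        simp [List.filter_cons, List.count_cons]
        omega
      · have hb : (x != c) = true := by simp [hx]
        simp [List.filter_cons, hb, List.count_cons, hx]
        omega

-- B's peel recursion computes A's filter over first occurrences
theorem keepExact_eq (n : Int) :
    ∀ (l : List Char),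
      pvKeepExact n l = (pvNewElems l []).filter (fun c => ((l.count c : Int) == n)) := by
  intro l
  induction hl : l.length using Nat.strong_induction_on generalizing l with
  | _ m ih =>
    cases l with
    | nil => simp [pvKeepExact, pvNewElems]
    | cons c t =>
      subst hl
      have hrest : (c :: t).filter (fun x => x != c) = t.filter (fun x => x != c) := by
        simp [List.filter]
      have hlt : (t.filter (fun x => x != c)).length < (c :: t).length :=
        Nat.lt_succ_of_le (List.length_filter_le _ _)
      have iht := ih _ hlt (t.filter (fun x => x != c)) rfl
      have hne : pvNewElems (c :: t) [] = c :: pvNewElems (t.filter (fun x => x != c)) [] := by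
        have h0 : pvNewElems (c :: t) [] = c :: pvNewElems t ([] ++ [c]) := by
          simp [pvNewElems]
        rw [h0, newElems_seen_filter t [] c (by simp)]
      rw [pvKeepExact]
      simp only [hrest]
      rw [iht, hne]
      have hcnt : (((c :: t).length : Int) - ((t.filter (fun x => x != c)).length : Int))
          = ((c :: t).count c : Int) := by
        have := count_add_length_filter t c
        simp only [List.count_cons_self, List.length_cons]
        push_cast
        omega
      rw [List.filter_cons, hcnt]
      have hF : (pvNewElems (t.filter (fun x => x != c)) []).filter
            (fun d => (((t.filter (fun x => x != c)).count d : Int) == n))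
          = (pvNewElems (t.filter (fun x => x != c)) []).filter
            (fun d => (((c :: t).count d : Int) == n)) := by
        refine List.filter_congr ?_
        intro x hx
        have hxr : x ∈ t.filter (fun x => x != c) := newElems_mem _ _ _ hx
        have hxc : x ≠ c := by
          have := List.of_mem_filter hxr
          simpa using this
        have hb2 : (x != c) = true := by simp [hxc]
        have hcc : (t.filter (fun y => y != c)).count x = (c :: t).count x := by
          have h1 : (t.filter (fun y => y != c)).count x = t.count x :=
            List.count_filter (p := fun y => y != c) (a := x) (l := t) hb2
          rw [h1, List.count_cons]
          simp [Ne.symm hxc]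
        rw [hcc]
      rw [hF]
      split <;> simp

-- ===== VERDICT (by name: the statement is the Claim_ definition above) =====
theorem remove_partial_answers_from_group_spec : Claim_equal_remove_partial_answers_from_group := by
  intro group_list _
  unfold Spec_remove_partial_answers_from_group
  unfold remove_partial_answers_from_group remove_partial_answers_from_group_alt
  rw [PySem.List.foldl_append_singleton_eq_map]
  refine List.map_congr_left ?_
  intro g _
  have hfun :
      (fun (st : List Char × List Char) character =>
          if character ∈ st.1 then st
          else (st.1 ++ [character],
                if ((PySem.Str.count g.2 (String.ofList [character]) : Int) == g.1)
                then st.2 ++ [character] else st.2))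
      = (fun (st : List Char × List Char) c =>
          if c ∈ st.1 then st
          else (st.1 ++ [c],
                if ((g.2.toList.count c : Int) == g.1) then st.2 ++ [c] else st.2)) := by
    funext st c
    rw [str_count_singleton]
  simp only [hfun]
  have := loopA (fun c => ((g.2.toList.count c : Int) == g.1)) g.2.toList [] []
  simp only [List.nil_append] at this
  rw [this, ← keepExact_eq]
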